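-- pv_equiv track=rewrite | github.com/flhps/crset-empirical-experiments | data_generator.py | find_max_dimensions
-- ===== SOURCE A (Python) =====
-- def find_max_dimensions(data, job_type="series"):
--     """
--     Find the maximum number of cascades and the maximum length of cascades across all samples.
--     """
--     max_cascades = 0
--     max_length = 0
--
--     if job_type == "series":
--         X, _ = data
--         for sample in X:
--             max_cascades = max(max_cascades, len(sample))
--             for cascade in sample:
--                 max_length = max(max_length, len(cascade))
--     elif job_type == "classification":
--         X1, X2, _ = data
--         for sample1, sample2 in zip(X1, X2):
--             max_cascades = max(max_cascades, len(sample1), len(sample2))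
--             for cascade in sample1 + sample2:
--                 max_length = max(max_length, len(cascade))
--
--     return max_cascades, max_length
-- ===== SOURCE B (Python) =====
-- def _max_rec(xs):
--     """Divide-and-conquer maximum of a list of non-negative ints; 0 on empty."""
--     if not xs:
--         return 0
--     if len(xs) == 1:
--         return xs[0]
--     mid = len(xs) // 2
--     return max(_max_rec(xs[:mid]), _max_rec(xs[mid:]))
--
--
-- def find_max_dimensions(data, job_type="series"):
--     """
--     Find the maximum number of cascades and the maximum length of cascades across all samples.
--     """
--     if job_type == "series":
--         X, _ = data
--         counts = [len(s) for s in X]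
--         lens = [len(c) for s in X for c in s]
--     elif job_type == "classification":
--         X1, X2, _ = data
--         counts = [len(s) for p in zip(X1, X2) for s in p]
--         lens = [len(c) for s1, s2 in zip(X1, X2) for c in s1 + s2]
--     else:
--         counts, lens = [], []
--     return _max_rec(counts), _max_rec(lens)
-- ===== Notes on version B (the rewrite author's own statement) =====
-- stated objective: alternative
-- what changed: A threads both maxima through one interleaved nested loop; B first materialises the two length lists (cascade counts and flattened cascade lengths) and then computes each maximum by a recursive divide-and-conquer reduction that halves the list, instead of any linear accumulator pass.
import Mathlib
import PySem

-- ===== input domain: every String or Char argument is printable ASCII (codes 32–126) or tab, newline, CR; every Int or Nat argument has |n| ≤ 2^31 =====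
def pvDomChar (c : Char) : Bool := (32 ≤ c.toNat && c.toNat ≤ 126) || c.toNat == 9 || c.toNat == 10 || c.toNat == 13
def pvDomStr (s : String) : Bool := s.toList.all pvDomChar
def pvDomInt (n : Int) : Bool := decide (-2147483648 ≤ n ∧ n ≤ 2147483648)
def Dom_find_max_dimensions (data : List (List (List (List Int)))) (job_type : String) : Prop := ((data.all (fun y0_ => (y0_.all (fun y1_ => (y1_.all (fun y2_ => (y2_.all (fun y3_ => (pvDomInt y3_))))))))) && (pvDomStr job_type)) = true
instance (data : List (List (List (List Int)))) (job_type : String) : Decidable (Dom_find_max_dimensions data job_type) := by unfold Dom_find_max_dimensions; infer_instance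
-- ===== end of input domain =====

-- B replaces A's single interleaved accumulator loop by: build the two length lists,
-- then take each maximum by a divide-and-conquer recursion (alternative decomposition, same cost).
-- Equivalence is about the RETURN value; neither program mutates its arguments.

-- ===== PORT A =====
def find_max_dimensions (data : List (List (List (List Int)))) (job_type : String) : Int × Int :=
  if job_type = "series" then
    match data with
    | [X, _] =>
      X.foldl (fun p sample =>
        (max p.1 (sample.length : Int),
         sample.foldl (fun m cascade => max m (cascade.length : Int)) p.2)) (0, 0)
    | _ => (0, 0)  -- unreachable under Pre_: Python raises on unpacking
  else if job_type = "classification" then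
    match data with
    | [X1, X2, _] =>
      (X1.zip X2).foldl (fun p ss =>
        (max (max p.1 (ss.1.length : Int)) (ss.2.length : Int),
         (ss.1 ++ ss.2).foldl (fun m cascade => max m (cascade.length : Int)) p.2)) (0, 0)
    | _ => (0, 0)  -- unreachable under Pre_
  else (0, 0)

-- ===== PORT B =====
-- _max_rec: divide-and-conquer maximum, 0 on empty; xs[:mid]/xs[mid:] with 0 ≤ mid ≤ len are take/drop
def maxRec : List Int → Int
  | [] => 0
  | [x] => x
  | x :: y :: rest =>
    let xs := x :: y :: rest
    let mid := xs.length / 2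
    max (maxRec (xs.take mid)) (maxRec (xs.drop mid))
  termination_by xs => xs.length
  decreasing_by
  · simp only [List.length_take]; simp only [List.length_cons]; omega
  · simp only [List.length_drop]; simp only [List.length_cons]; omega

def find_max_dimensions_alt (data : List (List (List (List Int)))) (job_type : String) : Int × Int :=
  if job_type = "series" then
    if data.length = 2 then  -- tuple unpacking X, _ = data
      let X := data.headI
      let counts := X.map (fun s => (s.length : Int))
      let lens := X.flatMap (fun s => s.map (fun c => (c.length : Int)))
      (maxRec counts, maxRec lens)
    else (0, 0)  -- unreachable under Pre_: Python raises on unpacking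
  else if job_type = "classification" then
    if data.length = 3 then  -- tuple unpacking X1, X2, _ = data
      let X1 := data.headI
      let X2 := data.tail.headI
      let counts := (X1.zip X2).flatMap (fun p => [(p.1.length : Int), (p.2.length : Int)])
      let lens := (X1.zip X2).flatMap (fun ss => (ss.1 ++ ss.2).map (fun c => (c.length : Int)))
      (maxRec counts, maxRec lens)
    else (0, 0)  -- unreachable under Pre_
  else (maxRec [], maxRec [])

-- ===== PRECONDITION & SPEC =====
-- Pre_ excludes exactly the inputs where Python A raises: tuple unpacking needs len(data)=2
-- for "series" and len(data)=3 for "classification" (B raises there too).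
def Pre_find_max_dimensions (data : List (List (List (List Int)))) (job_type : String) : Prop :=
  (job_type = "series" → data.length = 2) ∧ (job_type = "classification" → data.length = 3)
instance (data : List (List (List (List Int)))) (job_type : String) : Decidable (Pre_find_max_dimensions data job_type) := by unfold Pre_find_max_dimensions; infer_instance
def pvWitness_find_max_dimensions : List (List (List (List Int))) × String := ([[[[1, 2], [3]]], []], "series")

def Spec_find_max_dimensions (data : List (List (List (List Int)))) (job_type : String) (out : Int × Int) : Prop := out = find_max_dimensions_alt data job_type
instance (data : List (List (List (List Int)))) (job_type : String) (out : Int × Int) : Decidable (Spec_find_max_dimensions data job_type out) := by unfold Spec_find_max_dimensions; infer_instance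

-- ===== CLAIM (what is proved, stated in full; the proofs are below) =====
def Claim_equal_find_max_dimensions : Prop := ∀ (data : List (List (List (List Int)))) (job_type : String), Dom_find_max_dimensions data job_type → Pre_find_max_dimensions data job_type → Spec_find_max_dimensions data job_type (find_max_dimensions data job_type)

-- ===== LEMMAS AND PROOFS =====

-- splitting an interleaved pair-fold into two independent folds
theorem foldl_pair_split {α : Type} (f : Int → α → Int) (g : Int → α → Int)
    (X : List α) (a b : Int) :
    X.foldl (fun p s => (f p.1 s, g p.2 s)) (a, b) = (X.foldl f a, X.foldl g b) := by
  induction X generalizing a b with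
  | nil => rfl
  | cons x xs ih => simp [List.foldl, ih]

-- fold of an inner fold over max = fold of max over the flattened list
theorem foldl_max_flatMap {α : Type} (h : α → List Int) (X : List α) (b : Int) :
    X.foldl (fun m s => (h s).foldl max m) b = (X.flatMap h).foldl max b := by
  induction X generalizing b with
  | nil => rfl
  | cons x xs ih => simp [List.foldl, List.flatMap_cons, List.foldl_append, ih]

theorem foldl_max_shift (l : List Int) (a b : Int) :
    l.foldl max (max a b) = max a (l.foldl max b) := by
  induction l generalizing b with
  | nil => rfl
  | cons x t ih => simp only [List.foldl, max_assoc, ih]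

theorem le_foldl_max (l : List Int) (a : Int) : a ≤ l.foldl max a := by
  induction l generalizing a with
  | nil => exact le_refl _
  | cons x t ih => exact le_trans (le_max_left a x) (ih _)

theorem foldl_max_zero_append (A B : List Int) :
    (A ++ B).foldl max 0 = max (A.foldl max 0) (B.foldl max 0) := by
  have h0 : (0 : Int) ≤ A.foldl max 0 := le_foldl_max A 0
  have : A.foldl max 0 = max (A.foldl max 0) 0 := (max_eq_left h0).symm
  rw [List.foldl_append, this, foldl_max_shift]
  rw [← this]

-- maxRec equals the left fold of max from 0 on a list of non-negative ints
theorem maxRec_eq_foldl (l : List Int) (h : ∀ x ∈ l, 0 ≤ x) : maxRec l = l.foldl max 0 := by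
  generalize hn : l.length = n
  induction n using Nat.strong_induction_on generalizing l with
  | _ n ih =>
    match l, h with
    | [], _ => simp [maxRec]
    | [x], h => simp [maxRec, max_eq_right (h x (by simp))]
    | x :: y :: rest, h =>
      rw [maxRec]
      set xs : List Int := x :: y :: rest with hxs
      set mid := xs.length / 2 with hmid
      have hlen : xs.length = n := hn
      have h1 : (xs.take mid).length < n := by
        simp only [List.length_take]; simp only [hxs, List.length_cons] at hlen ⊢; omega
      have h2 : (xs.drop mid).length < n := by
        simp only [List.length_drop]; simp only [hxs, List.length_cons] at hlen ⊢; omega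
      rw [ih _ h1 _ (fun z hz => h z (List.mem_of_mem_take hz)) rfl,
          ih _ h2 _ (fun z hz => h z (List.mem_of_mem_drop hz)) rfl,
          ← foldl_max_zero_append, List.take_append_drop]

theorem len_nonneg_map {α : Type} (L : List (List α)) :
    ∀ x ∈ L.map (fun s => ((s.length : Int))), 0 ≤ x := by
  intro x hx
  simp only [List.mem_map] at hx
  obtain ⟨s, _, rfl⟩ := hx
  exact Int.natCast_nonneg _

theorem len_nonneg_flatMap {α β : Type} (L : List α) (h : α → List (List β))
    (x : Int) (hx : x ∈ L.flatMap (fun s => (h s).map (fun c => ((c.length : Int))))) : 0 ≤ x := by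
  simp only [List.mem_flatMap, List.mem_map] at hx
  obtain ⟨s, _, c, _, rfl⟩ := hx
  exact Int.natCast_nonneg _

theorem pair_nonneg (P : List (List (List Int) × List (List Int))) :
    ∀ x ∈ P.flatMap (fun ss => [((ss.1.length : Int)), ((ss.2.length : Int))]), 0 ≤ x := by
  intro x hx
  simp only [List.mem_flatMap, List.mem_cons] at hx
  obtain ⟨ss, _, h⟩ := hx
  rcases h with h | h | h
  · exact h ▸ Int.natCast_nonneg _
  · exact h ▸ Int.natCast_nonneg _
  · simp at h

theorem series_eq (X : List (List (List Int))) :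
    X.foldl (fun p sample =>
        (max p.1 (sample.length : Int),
         sample.foldl (fun m cascade => max m (cascade.length : Int)) p.2)) ((0 : Int), (0 : Int)) =
      (maxRec (X.map (fun s => (s.length : Int))),
       maxRec (X.flatMap (fun s => s.map (fun c => (c.length : Int))))) := by
  refine .trans (foldl_pair_split (fun a sample => max a (sample.length : Int))
      (fun b sample => sample.foldl (fun m cascade => max m (cascade.length : Int)) b) X 0 0) ?_
  have h1 : X.foldl (fun a sample => max a (sample.length : Int)) 0
      = maxRec (X.map (fun s => (s.length : Int))) := by
    rw [maxRec_eq_foldl _ (len_nonneg_map X), List.foldl_map]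
  have h2 : X.foldl (fun b sample => sample.foldl (fun m cascade => max m (cascade.length : Int)) b) 0
      = maxRec (X.flatMap (fun s => s.map (fun c => (c.length : Int)))) := by
    rw [maxRec_eq_foldl _ (fun x hx => len_nonneg_flatMap X (fun s => s) x hx),
        ← foldl_max_flatMap]
    congr 1
    funext m s
    rw [List.foldl_map]
  rw [h1, h2]

theorem class_eq (X1 X2 : List (List (List Int))) :
    (X1.zip X2).foldl (fun p ss =>
        (max (max p.1 (ss.1.length : Int)) (ss.2.length : Int),
         (ss.1 ++ ss.2).foldl (fun m cascade => max m (cascade.length : Int)) p.2)) ((0 : Int), (0 : Int)) =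
      (maxRec ((X1.zip X2).flatMap (fun p => [(p.1.length : Int), (p.2.length : Int)])),
       maxRec ((X1.zip X2).flatMap (fun ss => (ss.1 ++ ss.2).map (fun c => (c.length : Int))))) := by
  refine .trans (foldl_pair_split (fun a ss => max (max a (ss.1.length : Int)) (ss.2.length : Int))
      (fun b ss => (ss.1 ++ ss.2).foldl (fun m cascade => max m (cascade.length : Int)) b) (X1.zip X2) 0 0) ?_
  have h1 : (X1.zip X2).foldl (fun a ss => max (max a (ss.1.length : Int)) (ss.2.length : Int)) 0
      = maxRec ((X1.zip X2).flatMap (fun p => [(p.1.length : Int), (p.2.length : Int)])) := by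
    rw [maxRec_eq_foldl _ (pair_nonneg (X1.zip X2)), ← foldl_max_flatMap]
    rfl
  have h2 : (X1.zip X2).foldl
        (fun b ss => (ss.1 ++ ss.2).foldl (fun m cascade => max m (cascade.length : Int)) b) 0
      = maxRec ((X1.zip X2).flatMap (fun ss => (ss.1 ++ ss.2).map (fun c => (c.length : Int)))) := by
    rw [maxRec_eq_foldl _ (fun x hx => len_nonneg_flatMap (X1.zip X2) (fun ss => ss.1 ++ ss.2) x hx),
        ← foldl_max_flatMap]
    congr 1
    funext m ss
    rw [List.foldl_map]
  rw [h1, h2]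

-- ===== VERDICT (by name: the statement is the Claim_ definition above) =====
theorem find_max_dimensions_spec : Claim_equal_find_max_dimensions := by
  intro data job_type _ hpre
  unfold Spec_find_max_dimensions find_max_dimensions find_max_dimensions_alt
  by_cases hs : job_type = "series"
  · have hlen : data.length = 2 := hpre.1 hs
    match data, hlen with
    | [X, g], _ =>
      simp only [hs, if_true]
      exact series_eq X
  · simp only [if_neg hs]
    by_cases hc : job_type = "classification"
    · have hlen : data.length = 3 := hpre.2 hc
      match data, hlen with
      | [X1, X2, g], _ =>
        simp only [hc, if_true]
        exact class_eq X1 X2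
    · simp [hc, maxRec]
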